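-- pv_equiv track=rewrite | github.com/233Steven/Using-Dynamic-and-Static-Techniques-to-Establish-Traceability-Links-Between-Production-Code-and-Test | code/util.py | get_file_and_method_from_gt
-- ===== SOURCE A (Python) =====
-- from collections import defaultdict
--
-- def get_file_and_method_from_gt(gt):
--     tfs = set()
--     tt = defaultdict(set)
--     pfs = set()
--     pp = defaultdict(set)
--     for gtt in gt:
--         tfs.add(gtt[0])
--         pfs.add(gtt[2])
--         tt[gtt[0]].add(gtt[1])
--         pp[gtt[2]].add(gtt[3])
--     return tfs, tt, pfs, pp
-- ===== SOURCE B (Python) =====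
-- def get_file_and_method_from_gt(gt):
--     def side(fi, mi):
--         files = []
--         for g in gt:
--             if g[fi] not in files:
--                 files.append(g[fi])
--         d = {f: {g[mi] for g in gt if g[fi] == f} for f in files}
--         return set(files), d
--     tfs, tt = side(0, 1)
--     pfs, pp = side(2, 3)
--     return tfs, tt, pfs, pp
-- ===== Notes on version B (the rewrite author's own statement) =====
-- stated objective: alternative
-- what changed: Instead of A's single pass that maintains four accumulators (two sets and two defaultdict(set)s), B is staged and keys-first: it first computes the distinct file list for each side, then builds each map with a dict comprehension that gathers every file's method set by a per-key filter scan of gt, and derives the file sets from those lists.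
import Mathlib
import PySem

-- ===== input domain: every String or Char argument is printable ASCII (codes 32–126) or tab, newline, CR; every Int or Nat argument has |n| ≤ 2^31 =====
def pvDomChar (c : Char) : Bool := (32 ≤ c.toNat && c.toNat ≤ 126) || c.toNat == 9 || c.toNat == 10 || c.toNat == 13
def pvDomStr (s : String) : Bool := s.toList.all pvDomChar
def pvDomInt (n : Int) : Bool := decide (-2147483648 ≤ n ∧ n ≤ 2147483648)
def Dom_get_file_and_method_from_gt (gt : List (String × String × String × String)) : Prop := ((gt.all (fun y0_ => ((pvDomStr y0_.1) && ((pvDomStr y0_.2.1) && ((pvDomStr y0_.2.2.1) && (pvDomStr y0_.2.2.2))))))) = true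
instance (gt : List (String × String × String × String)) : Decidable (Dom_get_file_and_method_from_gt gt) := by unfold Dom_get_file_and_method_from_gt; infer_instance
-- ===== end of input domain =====

-- B replaces A's single-pass four-accumulator loop by a staged keys-first algorithm:
-- list the distinct files, then gather each file's methods by a per-key filter scan
-- (objective: alternative decomposition, not faster).

-- ===== PORT A =====
-- A's loop: for each tuple, add to both file sets and into both defaultdict(set)s.
def get_file_and_method_from_gt (gt : List (String × String × String × String)) : List String × (List (String × List String)) × List String × (List (String × List String)) :=
  let st := gt.foldl (fun acc gtt =>
      let (tfs, tt, pfs, pp) := acc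
      (PySem.Set.add tfs gtt.1,
       tt.modify gtt.1 PySem.Set.empty (fun s => PySem.Set.add s gtt.2.1),
       PySem.Set.add pfs gtt.2.2.1,
       pp.modify gtt.2.2.1 PySem.Set.empty (fun s => PySem.Set.add s gtt.2.2.2)))
    ((PySem.Set.empty : PySem.Set String), (PySem.Dict.empty : PySem.Dict String (PySem.Set String)),
     (PySem.Set.empty : PySem.Set String), (PySem.Dict.empty : PySem.Dict String (PySem.Set String)))
  (st.1, st.2.1.items, st.2.2.1, st.2.2.2.items)

-- ===== PORT B =====
-- B's helper side(fi, mi): first the distinct-files list, then a dict comprehension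
-- collecting, per file, the set of its methods by scanning gt again.
def pvSide (gt : List (String × String × String × String))
    (key meth : String × String × String × String → String) :
    List String × PySem.Dict String (PySem.Set String) :=
  let files : List String := gt.foldl (fun fs g => if key g ∈ fs then fs else fs ++ [key g]) []
  let d : PySem.Dict String (PySem.Set String) :=
    files.foldl (fun d f => d.insert f (PySem.Set.ofList ((gt.filter (fun g => key g == f)).map meth))) PySem.Dict.empty
  (PySem.Set.ofList files, d)

def get_file_and_method_from_gt_alt (gt : List (String × String × String × String)) : List String × (List (String × List String)) × List String × (List (String × List String)) :=
  let t := pvSide gt (fun g => g.1) (fun g => g.2.1)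
  let p := pvSide gt (fun g => g.2.2.1) (fun g => g.2.2.2)
  (t.1, t.2.items, p.1, p.2.items)

-- ===== PRECONDITION & SPEC =====
def Spec_get_file_and_method_from_gt (gt : List (String × String × String × String)) (out : List String × (List (String × List String)) × List String × (List (String × List String))) : Prop := out = get_file_and_method_from_gt_alt gt
instance (gt : List (String × String × String × String)) (out : List String × (List (String × List String)) × List String × (List (String × List String))) : Decidable (Spec_get_file_and_method_from_gt gt out) := by unfold Spec_get_file_and_method_from_gt; infer_instance

-- ===== CLAIM (what is proved, stated in full; the proofs are below) =====
def Claim_equal_get_file_and_method_from_gt : Prop := ∀ (gt : List (String × String × String × String)), Dom_get_file_and_method_from_gt gt → Spec_get_file_and_method_from_gt gt (get_file_and_method_from_gt gt)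

-- ===== LEMMAS AND PROOFS =====

-- A's single fold over the 4-tuple is the 4-tuple of the component folds.
theorem a_fold_split (gt : List (String × String × String × String))
    (tfs pfs : PySem.Set String) (tt pp : PySem.Dict String (PySem.Set String)) :
    gt.foldl (fun acc gtt =>
      let (tfs, tt, pfs, pp) := acc
      (PySem.Set.add tfs gtt.1,
       tt.modify gtt.1 PySem.Set.empty (fun s => PySem.Set.add s gtt.2.1),
       PySem.Set.add pfs gtt.2.2.1,
       pp.modify gtt.2.2.1 PySem.Set.empty (fun s => PySem.Set.add s gtt.2.2.2)))
      (tfs, tt, pfs, pp)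
    = (gt.foldl (fun s g => PySem.Set.add s g.1) tfs,
       gt.foldl (fun d g => d.modify g.1 PySem.Set.empty (fun s => PySem.Set.add s g.2.1)) tt,
       gt.foldl (fun s g => PySem.Set.add s g.2.2.1) pfs,
       gt.foldl (fun d g => d.modify g.2.2.1 PySem.Set.empty (fun s => PySem.Set.add s g.2.2.2)) pp) := by
  induction gt generalizing tfs tt pfs pp with
  | nil => rfl
  | cons g rest ih => simp only [List.foldl_cons]; exact ih _ _ _ _

-- B's distinct-files loop builds exactly set(gt.map key).
theorem files_eq_ofList (gt : List (String × String × String × String))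
    (key : String × String × String × String → String) :
    gt.foldl (fun fs g => if key g ∈ fs then fs else fs ++ [key g]) ([] : List String)
    = PySem.Set.ofList (gt.map key) := by
  rw [PySem.Set.ofList_eq_foldl, List.foldl_map]
  have hfun : (fun (fs : List String) (g : String × String × String × String) => if key g ∈ fs then fs else fs ++ [key g])
      = (fun (fs : List String) g => PySem.Set.add fs (key g)) := by
    funext fs g
    simp [PySem.Set.add]
  rw [hfun]

-- A's set-accumulating fold, keyed, is also set(gt.map key).
theorem a_set_eq_ofList (gt : List (String × String × String × String))
    (key : String × String × String × String → String) :
    gt.foldl (fun s g => PySem.Set.add s (key g)) PySem.Set.empty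
    = PySem.Set.ofList (gt.map key) := by
  rw [PySem.Set.ofList_eq_foldl, List.foldl_map]
  rfl

-- Lookup in A's defaultdict(set) fold: the value at c is the set of c's methods, in order.
theorem getD_foldl_modify_setadd (gt : List (String × String × String × String))
    (key meth : String × String × String × String → String)
    (d : PySem.Dict String (PySem.Set String)) (c : String) :
    (gt.foldl (fun d g => d.modify (key g) PySem.Set.empty (fun s => PySem.Set.add s (meth g))) d).getD c PySem.Set.empty
    = PySem.Set.update (d.getD c PySem.Set.empty) ((gt.filter (fun g => key g == c)).map meth) := by
  induction gt generalizing d with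
  | nil => simp [PySem.Set.update]
  | cons g rest ih =>
    simp only [List.foldl_cons, List.filter_cons]
    by_cases h : key g = c
    · subst h
      rw [ih]
      simp [PySem.Dict.getD_modify_self, PySem.Set.update]
    · have hcf : (key g == c) = false := by simp [h]
      rw [ih]
      simp [hcf, PySem.Dict.getD_modify, Ne.symm h]

-- One side of A: the dict fold, with empty start, keyed by `key`.
theorem a_dict_items (gt : List (String × String × String × String))
    (key meth : String × String × String × String → String) :
    (gt.foldl (fun d g => d.modify (key g) PySem.Set.empty (fun s => PySem.Set.add s (meth g))) PySem.Dict.empty).items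
    = (PySem.Set.ofList (gt.map key)).map
        (fun f => (f, PySem.Set.ofList ((gt.filter (fun g => key g == f)).map meth))) := by
  set D := gt.foldl (fun d g => d.modify (key g) PySem.Set.empty (fun s => PySem.Set.add s (meth g))) PySem.Dict.empty with hD
  have hkeys : D.keys = PySem.Set.ofList (gt.map key) := by
    rw [hD, PySem.Dict.keys_foldl_modify_key]
    rfl
  have hnd : D.keys.Nodup := by
    rw [hkeys]; exact PySem.Set.nodup_ofList _
  rw [PySem.Dict.items_eq_map_keys D hnd PySem.Set.empty, hkeys]
  apply List.map_congr_left
  intro f _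
  rw [hD, getD_foldl_modify_setadd]
  simp [PySem.Dict.getD_empty, PySem.Set.update, PySem.Set.ofList_eq_foldl]

-- One side of B: the insert fold over the distinct files appends fresh keys in order.
theorem b_dict_items (gt : List (String × String × String × String))
    (key meth : String × String × String × String → String) :
    ((PySem.Set.ofList (gt.map key)).foldl
        (fun d f => d.insert f (PySem.Set.ofList ((gt.filter (fun g => key g == f)).map meth)))
        PySem.Dict.empty).items
    = (PySem.Set.ofList (gt.map key)).map
        (fun f => (f, PySem.Set.ofList ((gt.filter (fun g => key g == f)).map meth))) := by
  rw [PySem.Dict.items_foldl_insert_fresh (PySem.Set.ofList (gt.map key)) (fun f => f)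
        (fun f => PySem.Set.ofList ((gt.filter (fun g => key g == f)).map meth)) PySem.Dict.empty
        (fun a _ => PySem.Dict.contains_empty a)
        (by simp [PySem.Set.nodup_ofList])]
  simp [PySem.Dict.empty]

-- ===== VERDICT (by name: the statement is the Claim_ definition above) =====
theorem get_file_and_method_from_gt_spec : Claim_equal_get_file_and_method_from_gt := by
  intro gt _
  unfold Spec_get_file_and_method_from_gt get_file_and_method_from_gt get_file_and_method_from_gt_alt pvSide
  simp only [a_fold_split, files_eq_ofList]
  refine Prod.ext ?_ (Prod.ext ?_ (Prod.ext ?_ ?_)) <;> simp only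
  · rw [a_set_eq_ofList, PySem.Set.ofList_ofList]
  · rw [a_dict_items, b_dict_items]
  · rw [a_set_eq_ofList, PySem.Set.ofList_ofList]
  · rw [a_dict_items, b_dict_items]
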